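-- pv_equiv track=rewrite | github.com/cls/aoc2020 | day6.py | read_groups
-- ===== SOURCE A (Python) =====
-- def read_groups(lines):
--     group = []
--     for line in lines:
--         line = line.strip()
--         if line:
--             group.append(set(line))
--         elif group:
--             yield group
--             group = []
--     if group:
--         yield group
-- ===== SOURCE B (Python) =====
-- from itertools import groupby
--
--
-- def read_groups(lines):
--     for key, grp in groupby(lines, key=lambda l: bool(l.strip())):
--         if key:
--             yield [set(l.strip()) for l in grp]
-- ===== Notes on version B (the rewrite author's own statement) =====
-- stated objective: idiomatic
-- what changed: Replaces the explicit accumulator state machine (append / flush-on-blank / trailing flush) with itertools.groupby over a blank/non-blank key, yielding one mapped list per non-blank run.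
import Mathlib
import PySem

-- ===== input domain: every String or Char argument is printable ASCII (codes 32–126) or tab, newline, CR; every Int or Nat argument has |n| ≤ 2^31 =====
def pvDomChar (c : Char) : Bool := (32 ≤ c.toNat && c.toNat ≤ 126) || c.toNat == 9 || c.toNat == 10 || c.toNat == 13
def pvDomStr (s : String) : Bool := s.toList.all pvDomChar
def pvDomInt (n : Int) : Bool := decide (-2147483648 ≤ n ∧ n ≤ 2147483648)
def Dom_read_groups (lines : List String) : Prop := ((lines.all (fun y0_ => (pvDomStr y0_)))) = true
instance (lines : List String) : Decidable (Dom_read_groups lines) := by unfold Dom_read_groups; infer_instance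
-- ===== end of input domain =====

-- B replaces A's explicit accumulator state machine with a groupby-style
-- run decomposition (split into blank/non-blank runs, map the non-blank runs);
-- the generator's yields are collected as a list. Same cost, different structure.

-- ===== PORT A =====

-- set(line) for an (already stripped) line: the distinct characters, in first-occurrence
-- order, as one-character strings (dict[K,V]/set conventions of the type mapping).
def pvCharSetA (s : String) : List String :=
  PySem.Set.ofList (s.toList.map (fun c => String.ofList [c]))

-- the generator loop of A: `group` is the accumulator, yields are collected in order
def readGroupsGo (lines : List String) (group : List (List String)) :
    List (List (List String)) :=
  match lines with
  | [] => if group.isEmpty then [] else [group]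
  | l :: ls =>
    let line := PySem.Str.strip l
    if line ≠ "" then
      readGroupsGo ls (group ++ [pvCharSetA line])
    else if group.isEmpty then
      readGroupsGo ls []
    else
      group :: readGroupsGo ls []

def read_groups (lines : List String) : List (List (List String)) :=
  readGroupsGo lines []

-- ===== PORT B =====

-- key=lambda l: bool(l.strip())
def pvKey (l : String) : Bool := decide (PySem.Str.strip l ≠ "")

-- set(l.strip()) for a raw line
def pvCharSetB (l : String) : List String :=
  PySem.Set.ofList ((PySem.Str.strip l).toList.map (fun c => String.ofList [c]))

-- itertools.groupby(lines, key=pvKey): maximal runs of lines with equal key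
def pvRuns (lines : List String) : List (Bool × List String) :=
  match lines with
  | [] => []
  | l :: ls =>
    match pvRuns ls with
    | [] => [(pvKey l, [l])]
    | (k, g) :: rest =>
      if pvKey l = k then (k, l :: g) :: rest
      else (pvKey l, [l]) :: (k, g) :: rest

-- yield [set(l.strip()) for l in grp] for each run with key True
def read_groups_alt (lines : List String) : List (List (List String)) :=
  (pvRuns lines).filterMap
    (fun p => if p.1 then some (p.2.map pvCharSetB) else none)

-- ===== PRECONDITION & SPEC =====
def Spec_read_groups (lines : List String) (out : List (List (List String))) : Prop := out = read_groups_alt lines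
instance (lines : List String) (out : List (List (List String))) : Decidable (Spec_read_groups lines out) := by unfold Spec_read_groups; infer_instance

-- ===== CLAIM (what is proved, stated in full; the proofs are below) =====
def Claim_equal_read_groups : Prop := ∀ (lines : List String), Dom_read_groups lines → Spec_read_groups lines (read_groups lines)

-- ===== LEMMAS AND PROOFS =====

-- what A computes, expressed on the run decomposition: the pending group is merged
-- into a leading true-run, emitted before a leading false-run, flushed at the end
def pvMerge (group : List (List String)) (rs : List (Bool × List String)) :
    List (List (List String)) :=
  match rs with
  | [] => if group.isEmpty then [] else [group]
  | (true, g) :: rest =>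
      (group ++ g.map pvCharSetB) ::
        rest.filterMap (fun p => if p.1 then some (p.2.map pvCharSetB) else none)
  | (false, _) :: rest =>
      (if group.isEmpty then [] else [group]) ++
        rest.filterMap (fun p => if p.1 then some (p.2.map pvCharSetB) else none)

lemma pvMerge_nil (rs : List (Bool × List String)) :
    pvMerge [] rs =
      rs.filterMap (fun p => if p.1 then some (p.2.map pvCharSetB) else none) := by
  match rs with
  | [] => rfl
  | (true, g) :: rest => simp [pvMerge]
  | (false, g) :: rest => simp [pvMerge]

lemma pvCharSetA_strip (l : String) : pvCharSetA (PySem.Str.strip l) = pvCharSetB l := rfl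

lemma readGroupsGo_eq_merge (lines : List String) (group : List (List String)) :
    readGroupsGo lines group = pvMerge group (pvRuns lines) := by
  induction lines generalizing group with
  | nil => rfl
  | cons l ls ih =>
    by_cases hk : PySem.Str.strip l ≠ ""
    · -- nonblank line: key true
      have hkey : pvKey l = true := by simp [pvKey, hk]
      rw [readGroupsGo]
      rw [if_pos hk, ih, pvCharSetA_strip]
      rcases hr : pvRuns ls with _ | ⟨⟨k, g⟩, rest⟩
      · simp [pvRuns, hr, hkey, pvMerge]
      · cases k with
        | true => simp [pvRuns, hr, hkey, pvMerge]
        | false => simp [pvRuns, hr, hkey, pvMerge]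
    · -- blank line: key false
      have hk' : PySem.Str.strip l = "" := by simpa using hk
      have hkey : pvKey l = false := by simp [pvKey, hk']
      have hgo : (if group.isEmpty then readGroupsGo ls []
                  else group :: readGroupsGo ls [])
          = (if group.isEmpty then [] else [group]) ++ pvMerge [] (pvRuns ls) := by
        by_cases hg : group.isEmpty <;> simp [hg, ih]
      rw [readGroupsGo]
      rw [if_neg hk, hgo]
      rcases hr : pvRuns ls with _ | ⟨⟨k, g⟩, rest⟩
      · simp [pvRuns, hr, hkey, pvMerge]
      · cases k with
        | true => simp [pvRuns, hr, hkey, pvMerge]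
        | false => simp [pvRuns, hr, hkey, pvMerge]

-- ===== VERDICT (by name: the statement is the Claim_ definition above) =====
theorem read_groups_spec : Claim_equal_read_groups := by
  intro lines _
  show read_groups lines = read_groups_alt lines
  rw [read_groups, readGroupsGo_eq_merge, pvMerge_nil]
  rfl
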